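-- pv_equiv track=rewrite | github.com/alscotty/Algorithms-Review | 5_1_2025.py | findEncryptedWord
-- ===== SOURCE A (Python) =====
-- import math
--
-- def findEncryptedWord(s):
--   if len(s) == 0:
--     return ""
--
--   result_string = ""
--
--   s_length = len(s)
--
--   if s_length % 2 == 0:
--     mid_idx = math.floor(s_length / 2) - 1
--   else:
--     mid_idx = math.floor(s_length / 2)
--
--   mid_char = s[mid_idx]
--
--   return mid_char + findEncryptedWord(s[0:mid_idx]) + findEncryptedWord(s[mid_idx+1:])
-- ===== SOURCE B (Python) =====
-- def findEncryptedWord(s):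
--     result = []
--     stack = [(0, len(s))]
--     while stack:
--         lo, hi = stack.pop()
--         if hi <= lo:
--             continue
--         mid = lo + (hi - lo - 1) // 2
--         result.append(s[mid])
--         stack.append((mid + 1, hi))
--         stack.append((lo, mid))
--     return "".join(result)
-- ===== Notes on version B (the rewrite author's own statement) =====
-- stated objective: faster
-- what changed: Replaced the recursive midpoint split (which builds sliced substring copies and concatenates result strings at every call) with an iterative pre-order traversal over an explicit stack of (lo,hi) index ranges on the original string, appending characters to a list and joining once.
import Mathlib
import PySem

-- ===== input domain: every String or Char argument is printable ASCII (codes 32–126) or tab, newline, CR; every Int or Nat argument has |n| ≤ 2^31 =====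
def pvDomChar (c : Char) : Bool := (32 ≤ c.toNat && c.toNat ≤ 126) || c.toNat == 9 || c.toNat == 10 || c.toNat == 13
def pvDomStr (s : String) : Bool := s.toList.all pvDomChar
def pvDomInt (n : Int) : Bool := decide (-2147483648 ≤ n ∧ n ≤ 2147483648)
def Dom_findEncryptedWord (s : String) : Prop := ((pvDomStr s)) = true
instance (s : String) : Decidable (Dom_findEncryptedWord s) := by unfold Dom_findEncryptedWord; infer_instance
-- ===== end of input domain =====

-- B replaces A's recursion (which slices substrings) with an iterative pre-order
-- traversal over an explicit stack of (lo,hi) index ranges; return values agree on all inputs.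

-- ===== PORT A =====
-- recursion over List Char; s[mid_idx] ported as getD (mid_idx < length whenever taken, so exact)
def findEncryptedWordAux (l : List Char) : List Char :=
  if l.length = 0 then []
  else
    let n := l.length
    let mid : Nat := if n % 2 = 0 then n / 2 - 1 else n / 2
    l.getD mid ' ' ::
      (findEncryptedWordAux (PySem.List.slice l (some 0) (some (mid : Int))) ++
       findEncryptedWordAux (PySem.List.slice l (some ((mid : Int) + 1)) none))
termination_by l.length
decreasing_by
  · simp only [PySem.List.slice_zero_start, PySem.List.slice_to_natCast, List.length_take]
    split <;> omega
  · have : ((mid : Int) + 1) = ((mid + 1 : Nat) : Int) := by push_cast; ring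
    rw [this, PySem.List.slice_from_natCast]
    simp only [List.length_drop]
    omega

def findEncryptedWord (s : String) : String := String.mk (findEncryptedWordAux s.toList)

-- ===== PORT B =====
-- explicit stack of (lo,hi) ranges over the fixed original character list; s[mid] is
-- getD (mid always in range when taken)
def findEncryptedWordLoop (l : List Char) : List (Nat × Nat) → List Char → List Char
  | [], acc => acc
  | (lo, hi) :: rest, acc =>
    if hi ≤ lo then findEncryptedWordLoop l rest acc
    else
      let mid := lo + (hi - lo - 1) / 2
      findEncryptedWordLoop l ((lo, mid) :: (mid + 1, hi) :: rest) (acc ++ [l.getD mid ' '])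
termination_by stack => (stack.map (fun p => 2 * (p.2 - p.1) + 1)).sum
decreasing_by
  · simp only [List.map_cons, List.sum_cons]; omega
  · simp only [List.map_cons, List.sum_cons]; omega

def findEncryptedWord_alt (s : String) : String :=
  String.mk (findEncryptedWordLoop s.toList [(0, s.toList.length)] [])

-- ===== PRECONDITION & SPEC =====
def Spec_findEncryptedWord (s : String) (out : String) : Prop := out = findEncryptedWord_alt s
instance (s : String) (out : String) : Decidable (Spec_findEncryptedWord s out) := by unfold Spec_findEncryptedWord; infer_instance

-- ===== CLAIM (what is proved, stated in full; the proofs are below) =====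
def Claim_equal_findEncryptedWord : Prop := ∀ (s : String), Dom_findEncryptedWord s → Spec_findEncryptedWord s (findEncryptedWord s)

-- ===== LEMMAS AND PROOFS =====

-- A on the segment [lo,hi) of l unfolds to head + the two sub-segments
lemma auxA_seg (l : List Char) (lo hi : Nat) (hlo : lo < hi) (hhi : hi ≤ l.length) :
    findEncryptedWordAux ((l.drop lo).take (hi - lo)) =
      l.getD (lo + (hi - lo - 1) / 2) ' ' ::
        (findEncryptedWordAux ((l.drop lo).take ((hi - lo - 1) / 2)) ++
         findEncryptedWordAux ((l.drop (lo + (hi - lo - 1) / 2 + 1)).take (hi - (lo + (hi - lo - 1) / 2 + 1)))) := by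
  have hlen : ((l.drop lo).take (hi - lo)).length = hi - lo := by
    simp [List.length_take, List.length_drop]; omega
  rw [findEncryptedWordAux]
  simp only [hlen, if_neg (show ¬ (hi - lo) = 0 by omega)]
  have hmid : (if (hi - lo) % 2 = 0 then (hi - lo) / 2 - 1 else (hi - lo) / 2) = (hi - lo - 1) / 2 := by
    split_ifs with h <;> omega
  rw [hmid]
  have hmlt : (hi - lo - 1) / 2 < hi - lo := by omega
  congr 1
  · -- head element
    have h1 : ((l.drop lo).take (hi - lo)).getD ((hi - lo - 1) / 2) ' '
        = (l.drop lo).getD ((hi - lo - 1) / 2) ' ' := by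
      rw [List.getD, List.getD, List.getElem?_take_of_lt hmlt]
    rw [h1, List.getD, List.getD, List.getElem?_drop]
  · congr 1
    · -- left slice [0:mid]
      simp only [PySem.List.slice_zero_start, PySem.List.slice_to_natCast]
      rw [List.take_take,
        show min ((hi - lo - 1) / 2) (hi - lo) = (hi - lo - 1) / 2 from by omega]
    · -- right slice [mid+1:]
      have hc : (((hi - lo - 1) / 2 : Nat) : Int) + 1 = (((hi - lo - 1) / 2 + 1 : Nat) : Int) := by
        push_cast; ring
      rw [hc, PySem.List.slice_from_natCast, List.drop_take, List.drop_drop,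
        show hi - lo - ((hi - lo - 1) / 2 + 1) = hi - (lo + (hi - lo - 1) / 2 + 1) from by omega,
        show lo + ((hi - lo - 1) / 2 + 1) = lo + (hi - lo - 1) / 2 + 1 from by omega]

-- the stack loop consumes the top range into A's value on that segment
lemma loopB_step (l : List Char) :
    ∀ (n lo hi : Nat), hi - lo ≤ n → hi ≤ l.length → ∀ rest acc,
      findEncryptedWordLoop l ((lo, hi) :: rest) acc =
        findEncryptedWordLoop l rest (acc ++ findEncryptedWordAux ((l.drop lo).take (hi - lo))) := by
  intro n
  induction n with
  | zero =>
    intro lo hi hle hhi rest acc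
    have h0 : hi - lo = 0 := by omega
    rw [findEncryptedWordLoop, if_pos (by omega)]
    rw [h0]
    simp [findEncryptedWordAux]
  | succ n ih =>
    intro lo hi hle hhi rest acc
    by_cases hord : hi ≤ lo
    · rw [findEncryptedWordLoop, if_pos hord]
      have h0 : hi - lo = 0 := by omega
      rw [h0]
      simp [findEncryptedWordAux]
    · push_neg at hord
      rw [findEncryptedWordLoop, if_neg (by omega)]
      set mid := lo + (hi - lo - 1) / 2 with hmid
      have h1 : mid - lo = (hi - lo - 1) / 2 := by omega
      have hml : mid ≤ l.length := by omega
      have hmh : hi ≤ l.length := hhi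
      rw [ih lo mid (by omega) (by omega), ih (mid + 1) hi (by omega) (by omega)]
      rw [auxA_seg l lo hi hord hhi]
      simp only [← hmid, h1, List.append_assoc, List.cons_append, List.nil_append]

theorem findEncryptedWord_eq (s : String) : findEncryptedWord s = findEncryptedWord_alt s := by
  unfold findEncryptedWord findEncryptedWord_alt
  rw [loopB_step s.toList s.toList.length 0 s.toList.length (by omega) (le_refl _)]
  simp [findEncryptedWordLoop]
  rw [← String.length_toList, List.take_length]

-- ===== VERDICT (by name: the statement is the Claim_ definition above) =====
theorem findEncryptedWord_spec : Claim_equal_findEncryptedWord := by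
  intro s _
  unfold Spec_findEncryptedWord
  exact findEncryptedWord_eq s
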